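-- pv_equiv track=rewrite | github.com/annoygithub/sigmod2021 | cegis/main/dfg.py | get_number
-- ===== SOURCE A (Python) =====
-- def get_number(s, i):
--     j = i
--     while s[j] in ['0', '1', '2', '3', '4', '5', '6', '7', '8', '9']:
--         j += 1
--     if s[j] == '.':
--         j += 1
--         while s[j] in ['0', '1', '2', '3', '4', '5', '6', '7', '8', '9']:
--             j += 1
--     return s[i:j]
-- ===== SOURCE B (Python) =====
-- def _digits_len(s, j):
--     # length of the digit run at index j (grammar nonterminal: digits -> digit digits | eps)
--     return 1 + _digits_len(s, j + 1) if s[j].isdigit() else 0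
--
--
-- def _number_len(s, j):
--     # grammar nonterminal: number -> digits ('.' digits)?
--     n = _digits_len(s, j)
--     if s[j + n] == '.':
--         return n + 1 + _digits_len(s, j + n + 1)
--     return n
--
--
-- def get_number(s, i):
--     return s[i:i + _number_len(s, i)]
-- ===== Notes on version B (the rewrite author's own statement) =====
-- stated objective: alternative
-- what changed: Replaces A's imperative two-while-loop scan that mutates an end index j and slices s[i:j] by a recursive-descent parser for the grammar number := digits ('.' digits)?, whose nonterminal functions recursively return match lengths that are combined arithmetically into one slice.
import Mathlib
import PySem

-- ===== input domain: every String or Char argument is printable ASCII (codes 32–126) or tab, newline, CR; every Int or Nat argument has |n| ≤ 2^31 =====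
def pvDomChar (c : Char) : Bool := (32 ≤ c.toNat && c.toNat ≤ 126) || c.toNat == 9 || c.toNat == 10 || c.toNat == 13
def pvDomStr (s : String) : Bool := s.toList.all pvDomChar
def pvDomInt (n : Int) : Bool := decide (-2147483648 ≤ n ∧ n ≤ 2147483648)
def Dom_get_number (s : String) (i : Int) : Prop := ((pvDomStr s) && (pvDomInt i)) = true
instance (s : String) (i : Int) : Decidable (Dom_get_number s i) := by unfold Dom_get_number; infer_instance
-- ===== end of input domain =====

-- B replaces A's imperative index-mutating scan (two while-loops advancing j, then a slice of
-- the accumulated j) by a recursive-descent parser for the grammar number := digits ('.' digits)?,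
-- whose nonterminals return match LENGTHS combined arithmetically (different decomposition, same cost).

-- ===== PORT A =====
def pvDigits : List Char := ['0', '1', '2', '3', '4', '5', '6', '7', '8', '9']

-- one digit-scanning 'while' of A; both of A's loops are this same code
def pvLoopA (cs : List Char) (j : Int) : Int :=
  match h : PySem.List.pyGet? cs j with
  | some c => if c ∈ pvDigits then pvLoopA cs (j + 1) else j
  | none => j    -- Python raises IndexError here; excluded by Pre_get_number
termination_by ((cs.length : Int) - j).toNat
decreasing_by
  have hin : PySem.Raise.InRange cs.length j := by
    by_contra hc
    rw [(PySem.List.pyGet?_eq_none_iff cs j).2 hc] at h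
    simp at h
  simp [PySem.Raise.InRange] at hin
  omega

def get_number (s : String) (i : Int) : String :=
  let cs := s.toList
  let j1 := pvLoopA cs i
  let j2 := match PySem.List.pyGet? cs j1 with
    | some c => if c = '.' then pvLoopA cs (j1 + 1) else j1
    | none => j1    -- Python raises IndexError here; excluded by Pre_get_number
  String.ofList (PySem.List.slice cs (some i) (some j2))

-- ===== PORT B =====
-- length of the digit run at index j (grammar nonterminal: digits -> digit digits | eps)
def pvDigitsLen (cs : List Char) (j : Int) : Int :=
  match h : PySem.List.pyGet? cs j with
  | some c => if PySem.Chars.isdigit c then 1 + pvDigitsLen cs (j + 1) else 0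
  | none => 0    -- Python raises IndexError here; excluded by Pre_get_number
termination_by ((cs.length : Int) - j).toNat
decreasing_by
  have hin : PySem.Raise.InRange cs.length j := by
    by_contra hc
    rw [(PySem.List.pyGet?_eq_none_iff cs j).2 hc] at h
    simp at h
  simp [PySem.Raise.InRange] at hin
  omega

-- grammar nonterminal: number -> digits ('.' digits)?
def pvNumberLen (cs : List Char) (j : Int) : Int :=
  let n := pvDigitsLen cs j
  match PySem.List.pyGet? cs (j + n) with
  | some c => if c = '.' then n + 1 + pvDigitsLen cs (j + n + 1) else n
  | none => n    -- Python raises IndexError here; excluded by Pre_get_number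

def get_number_alt (s : String) (i : Int) : String :=
  String.ofList (PySem.List.slice s.toList (some i) (some (i + pvNumberLen s.toList i)))

-- ===== PRECONDITION & SPEC =====
-- Pre_ excludes exactly the inputs where A raises IndexError: i outside Python's index
-- range for s, and inputs whose digits[.digits] scan (wrapping once through the string
-- start for negative i) runs off the end of s.
def Pre_get_number (s : String) (i : Int) : Prop :=
  let cs := s.toList
  let n : Int := cs.length
  (-n ≤ i ∧ i < n) ∧
  (let seen := if 0 ≤ i then cs.drop i.toNat else cs.drop (n + i).toNat ++ cs
   let r := seen.dropWhile (fun c => decide ('0' ≤ c ∧ c ≤ '9'))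
   r ≠ [] ∧ (r.head? = some '.' → r.tail.dropWhile (fun c => decide ('0' ≤ c ∧ c ≤ '9')) ≠ []))
instance (s : String) (i : Int) : Decidable (Pre_get_number s i) := by unfold Pre_get_number; infer_instance

def pvWitness_get_number : String × Int := ("12.5x", 0)

def Spec_get_number (s : String) (i : Int) (out : String) : Prop := out = get_number_alt s i
instance (s : String) (i : Int) (out : String) : Decidable (Spec_get_number s i out) := by unfold Spec_get_number; infer_instance

-- ===== CLAIM (what is proved, stated in full; the proofs are below) =====
def Claim_equal_get_number : Prop := ∀ (s : String) (i : Int), Dom_get_number s i → Pre_get_number s i → Spec_get_number s i (get_number s i)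

-- ===== LEMMAS AND PROOFS =====

-- A's membership test in the digit list coincides with Python's str.isdigit on every Char
lemma pv_digit_mem (c : Char) : (c ∈ pvDigits) ↔ PySem.Chars.isdigit c = true := by
  have key : ∀ (d : Char), c.val.toNat = d.val.toNat → c = d :=
    fun d h => Char.ext (UInt32.toNat_inj.mp h)
  simp only [PySem.Chars.isdigit, Bool.and_eq_true, decide_eq_true_eq, pvDigits,
    List.mem_cons, List.not_mem_nil, or_false, Char.le_def, UInt32.le_iff_toNat_le]
  constructor
  · intro h
    rcases h with rfl|rfl|rfl|rfl|rfl|rfl|rfl|rfl|rfl|rfl <;> exact ⟨by decide, by decide⟩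
  · rintro ⟨h1, h2⟩
    have e0 : ('0' : Char).val.toNat = 48 := by decide
    have e9 : ('9' : Char).val.toNat = 57 := by decide
    rw [e0] at h1; rw [e9] at h2
    have hv : c.val.toNat = 48 ∨ c.val.toNat = 49 ∨ c.val.toNat = 50 ∨ c.val.toNat = 51 ∨
        c.val.toNat = 52 ∨ c.val.toNat = 53 ∨ c.val.toNat = 54 ∨ c.val.toNat = 55 ∨
        c.val.toNat = 56 ∨ c.val.toNat = 57 := by omega
    rcases hv with h|h|h|h|h|h|h|h|h|h
    · exact Or.inl (key '0' (h.trans (by decide)))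
    · exact Or.inr (Or.inl (key '1' (h.trans (by decide))))
    · exact Or.inr (Or.inr (Or.inl (key '2' (h.trans (by decide)))))
    · exact Or.inr (Or.inr (Or.inr (Or.inl (key '3' (h.trans (by decide))))))
    · exact Or.inr (Or.inr (Or.inr (Or.inr (Or.inl (key '4' (h.trans (by decide)))))))
    · exact Or.inr (Or.inr (Or.inr (Or.inr (Or.inr (Or.inl (key '5' (h.trans (by decide))))))))
    · exact Or.inr (Or.inr (Or.inr (Or.inr (Or.inr (Or.inr (Or.inl (key '6' (h.trans (by decide)))))))))
    · exact Or.inr (Or.inr (Or.inr (Or.inr (Or.inr (Or.inr (Or.inr (Or.inl (key '7' (h.trans (by decide))))))))))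
    · exact Or.inr (Or.inr (Or.inr (Or.inr (Or.inr (Or.inr (Or.inr (Or.inr (Or.inl (key '8' (h.trans (by decide)))))))))))
    · exact Or.inr (Or.inr (Or.inr (Or.inr (Or.inr (Or.inr (Or.inr (Or.inr (Or.inr (key '9' (h.trans (by decide)))))))))))

-- A's digit while-loop advances its index by exactly B's digit-run length
lemma pvLoopA_eq (cs : List Char) (j : Int) : pvLoopA cs j = j + pvDigitsLen cs j := by
  fun_induction pvDigitsLen cs j with
  | case1 j c h hd ih =>
    rw [pvLoopA, h]
    simp only [(pv_digit_mem c).2 hd, if_true, ih]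
    ring
  | case2 j c h hd =>
    rw [pvLoopA, h]
    have : ¬ (c ∈ pvDigits) := fun hm => by simp [(pv_digit_mem c).1 hm] at hd
    simp [this]
  | case3 j h =>
    rw [pvLoopA, h]
    simp

lemma pvEnd_eq (cs : List Char) (i : Int) :
    (match PySem.List.pyGet? cs (pvLoopA cs i) with
     | some c => if c = '.' then pvLoopA cs (pvLoopA cs i + 1) else pvLoopA cs i
     | none => pvLoopA cs i) = i + pvNumberLen cs i := by
  rw [pvLoopA_eq]
  unfold pvNumberLen
  cases h : PySem.List.pyGet? cs (i + pvDigitsLen cs i) with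
  | none => simp [h]
  | some c =>
    by_cases hc : c = '.'
    · simp only [h, hc, if_true]
      rw [pvLoopA_eq]
      ring
    · simp [h, hc]

-- ===== VERDICT (by name: the statement is the Claim_ definition above) =====
theorem get_number_spec : Claim_equal_get_number := by
  intro s i _ _
  unfold Spec_get_number get_number get_number_alt
  simp only []
  rw [pvEnd_eq]
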